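-- pv_equiv track=rewrite | github.com/pypi-data/pypi-mirror-238 | packages/sanskrit-transliteration/sanskrit_transliteration-0.1.1.tar.gz/sanskrit_transliteration-0.1.1/sanskrit_transliteration/velthius_and_hk.py | hk_to_velthius
-- ===== SOURCE A (Python) =====
-- def hk_to_velthius(text: str):
--     replacements = {
--         "A": "aa",
--         "I": "ii",
--         "U": "uu",
--         "R": ".r",
--         "G": "\"n",
--         "J": "~n",
--         "T": ".t",
--         "D": ".d",
--         "N": ".n",
--         "S": ".s",
--         "z": "\"s",
--         "H": ".h",
--         "M": ".m",
--         "'": ".a"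
--     }
--     res, i, text_len = [], 0, len(text)
--     while i < text_len:
--         ch, nxt_ch = text[i], None
--         if i < text_len - 1:
--             nxt_ch = text[i + 1]
--         if text[i] == "R":
--             if nxt_ch == "R":
--                 res.append(".rr")
--                 i += 1
--             else:
--                 res.append(".r")
--         elif ch == "|":
--             res.append(".")
--         else:
--             res.append(
--                 replacements.get(ch, ch)
--             )
--         i += 1
--     return "".join(res)
-- ===== SOURCE B (Python) =====
-- def hk_to_velthius(text: str):
--     mapping = {
--         "|": ".",
--         "A": "aa",
--         "I": "ii",
--         "U": "uu",
--         "R": ".r",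
--         "G": "\"n",
--         "J": "~n",
--         "T": ".t",
--         "D": ".d",
--         "N": ".n",
--         "S": ".s",
--         "z": "\"s",
--         "H": ".h",
--         "M": ".m",
--         "'": ".a",
--     }
--     # Pair up runs of 'R' left-to-right exactly like the lookahead loop,
--     # then map every remaining character through one translation table.
--     return text.replace("RR", ".rr").translate(str.maketrans(mapping))
-- ===== Notes on version B (the rewrite author's own statement) =====
-- stated objective: idiomatic
-- what changed: Replaces the manual index loop with lookahead by two standard-library passes: str.replace('RR', '.rr') to consume R-pairs leftmost-first, then str.translate with a single table for all one-character substitutions (incl. 'R' and '|').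
import Mathlib
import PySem

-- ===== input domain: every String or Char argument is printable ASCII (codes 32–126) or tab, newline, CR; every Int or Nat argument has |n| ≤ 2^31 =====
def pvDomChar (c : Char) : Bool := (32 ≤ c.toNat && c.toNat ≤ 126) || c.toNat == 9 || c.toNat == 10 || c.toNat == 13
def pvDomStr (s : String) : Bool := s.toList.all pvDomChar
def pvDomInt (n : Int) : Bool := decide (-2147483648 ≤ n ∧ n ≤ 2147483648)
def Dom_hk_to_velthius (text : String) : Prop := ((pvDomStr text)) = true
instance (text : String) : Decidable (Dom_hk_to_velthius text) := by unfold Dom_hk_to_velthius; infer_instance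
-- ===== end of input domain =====

-- B replaces A's manual index loop (with one-character lookahead for "RR") by two
-- standard passes: str.replace("RR", ".rr") followed by a single-character translation
-- table (objective: idiomatic; same return value on every input).


-- ===== PORT A =====
-- the `replacements` dict literal of A
def hkReplacements : PySem.Dict Char String :=
  ⟨[('A', "aa"), ('I', "ii"), ('U', "uu"), ('R', ".r"), ('G', "\"n"), ('J', "~n"),
    ('T', ".t"), ('D', ".d"), ('N', ".n"), ('S', ".s"), ('z', "\"s"), ('H', ".h"),
    ('M', ".m"), ('\'', ".a")]⟩

-- A's `while i < text_len` loop over the index, with the `nxt_ch` lookahead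
def hkLoop (cs : List Char) (i : Nat) (res : List String) : List String :=
  if h : i < cs.length then
    if cs[i] = 'R' then
      if (if i < cs.length - 1 then cs[i+1]? else none) = some 'R' then
        hkLoop cs (i + 1 + 1) (res ++ [".rr"])
      else
        hkLoop cs (i + 1) (res ++ [".r"])
    else if cs[i] = '|' then
      hkLoop cs (i + 1) (res ++ ["."])
    else
      hkLoop cs (i + 1) (res ++ [hkReplacements.getD cs[i] (String.singleton cs[i])])
  else res
termination_by cs.length - i

def hk_to_velthius (text : String) : String :=
  PySem.Str.join "" (hkLoop text.toList 0 [])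

-- ===== PORT B =====
-- B's `mapping` dict literal ('|' entry first, then the fourteen of A)
def hkMapping : PySem.Dict Char String :=
  ⟨[('|', "."), ('A', "aa"), ('I', "ii"), ('U', "uu"), ('R', ".r"), ('G', "\"n"), ('J', "~n"),
    ('T', ".t"), ('D', ".d"), ('N', ".n"), ('S', ".s"), ('z', "\"s"), ('H', ".h"),
    ('M', ".m"), ('\'', ".a")]⟩

-- str.translate on the table built by str.maketrans(mapping): every code point is
-- replaced by its table entry, characters not in the table are kept (exact for this
-- table of single-character keys)
def hkTranslate (c : Char) : List Char := (hkMapping.getD c (String.singleton c)).toList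

def hk_to_velthius_alt (text : String) : String :=
  String.ofList ((PySem.Str.replace text "RR" ".rr").toList.flatMap hkTranslate)

-- ===== PRECONDITION & SPEC =====
def Spec_hk_to_velthius (text : String) (out : String) : Prop := out = hk_to_velthius_alt text
instance (text : String) (out : String) : Decidable (Spec_hk_to_velthius text out) := by unfold Spec_hk_to_velthius; infer_instance

-- ===== CLAIM (what is proved, stated in full; the proofs are below) =====
def Claim_equal_hk_to_velthius : Prop := ∀ (text : String), Dom_hk_to_velthius text → Spec_hk_to_velthius text (hk_to_velthius text)

-- ===== LEMMAS AND PROOFS =====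

-- leftmost non-overlapping replacement of "RR" by ".rr", as a direct recursion
def rspec : List Char → List Char
  | [] => []
  | c :: t =>
    if ['R', 'R'].isPrefixOf (c :: t) then '.' :: 'r' :: 'r' :: rspec (t.drop 1)
    else c :: rspec t
termination_by l => l.length
decreasing_by all_goals (simp; try omega)

-- what A's loop appends from position i on, as a direct recursion
def aspec : List Char → List String
  | [] => []
  | c :: t =>
    if c = 'R' then
      if t.head? = some 'R' then ".rr" :: aspec t.tail else ".r" :: aspec t
    else if c = '|' then "." :: aspec t
    else hkReplacements.getD c (String.singleton c) :: aspec t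
termination_by l => l.length
decreasing_by all_goals (simp [List.length_tail]; try omega)

theorem rspec_nil : rspec [] = [] := by simp only [rspec]

theorem rspec_cons (c : Char) (t : List Char) :
    rspec (c :: t) = if ['R', 'R'].isPrefixOf (c :: t) then '.' :: 'r' :: 'r' :: rspec (t.drop 1)
    else c :: rspec t := by
  simp only [rspec]

theorem aspec_nil : aspec [] = [] := by simp only [aspec]

theorem aspec_cons (c : Char) (t : List Char) :
    aspec (c :: t) = if c = 'R' then
      (if t.head? = some 'R' then ".rr" :: aspec t.tail else ".r" :: aspec t)
    else if c = '|' then "." :: aspec t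
    else hkReplacements.getD c (String.singleton c) :: aspec t := by
  simp only [aspec]

theorem go_eq (fuel : Nat) : ∀ (l acc : List Char), l.length ≤ fuel →
    PySem.Chars.replace.go ['R', 'R'] ['.', 'r', 'r'] fuel l acc = acc.reverse ++ rspec l := by
  induction fuel with
  | zero =>
    intro l acc h
    have : l = [] := by cases l <;> simp_all
    subst this
    simp [PySem.Chars.replace.go, rspec]
  | succ n ih =>
    intro l acc h
    cases l with
    | nil => simp [PySem.Chars.replace.go, rspec]
    | cons c t =>
      rw [PySem.Chars.replace.go]
      by_cases hp : ['R', 'R'].isPrefixOf (c :: t) = true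
      · simp only [hp, if_pos]
        have hlen : (List.drop (['R','R'].length) (c :: t)).length ≤ n := by
          simp at h ⊢; omega
        rw [ih _ _ hlen]
        have : List.drop (['R','R'].length) (c :: t) = t.drop 1 := by simp
        rw [this, rspec_cons, if_pos hp]
        simp
      · simp only [hp, if_neg, Bool.not_eq_true]
        have hlen : t.length ≤ n := by simp at h; omega
        rw [ih _ _ hlen, rspec_cons, if_neg (by simp [hp])]
        simp

theorem replace_eq (l : List Char) :
    PySem.Chars.replace l ['R', 'R'] ['.', 'r', 'r'] = rspec l := by
  rw [PySem.Chars.replace]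
  simp only [List.isEmpty_cons]
  simpa using go_eq l.length l [] (le_refl _)

theorem hkLoop_eq (cs : List Char) : ∀ (n i : Nat) (res : List String),
    cs.length - i ≤ n → hkLoop cs i res = res ++ aspec (cs.drop i) := by
  intro n
  induction n with
  | zero =>
    intro i res h
    have hge : cs.length ≤ i := by omega
    rw [hkLoop, dif_neg (by omega), List.drop_eq_nil_of_le hge, aspec_nil]
    simp
  | succ n ih =>
    intro i res h
    rw [hkLoop]
    by_cases hi : i < cs.length
    · have hdrop : cs.drop i = cs[i] :: cs.drop (i + 1) := List.drop_eq_getElem_cons hi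
      have hhead : (cs.drop (i + 1)).head? = cs[i+1]? := List.head?_drop
      have hnxt : (if i < cs.length - 1 then cs[i+1]? else none) = (cs.drop (i + 1)).head? := by
        by_cases h2 : i < cs.length - 1
        · simp [h2, hhead]
        · have hle : cs.length ≤ i + 1 := by omega
          simp [h2, hhead, List.getElem?_eq_none hle]
      rw [dif_pos hi, hnxt]
      by_cases hR : cs[i] = 'R'
      · rw [if_pos hR]
        by_cases hN : (cs.drop (i + 1)).head? = some 'R'
        · rw [if_pos hN, ih _ _ (by omega), hdrop, aspec_cons,
            if_pos hR, if_pos hN, List.tail_drop]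
          simp
        · rw [if_neg hN, ih _ _ (by omega), hdrop, aspec_cons,
            if_pos hR, if_neg hN]
          simp
      · rw [if_neg hR]
        by_cases hB : cs[i] = '|'
        · rw [if_pos hB, ih _ _ (by omega), hdrop, aspec_cons,
            if_neg hR, if_pos hB]
          simp
        · rw [if_neg hB, ih _ _ (by omega), hdrop, aspec_cons,
            if_neg hR, if_neg hB]
          simp
    · rw [dif_neg hi]
      have hge : cs.length ≤ i := by omega
      rw [List.drop_eq_nil_of_le hge, aspec_nil]
      simp

theorem getD_mapping_of_ne (c : Char) (d : String) (hc : c ≠ '|') :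
    hkMapping.getD c d = hkReplacements.getD c d := by
  have hb : ('|' == c) = false := beq_eq_false_iff_ne.mpr (fun h => hc h.symm)
  simp [hkMapping, hkReplacements, PySem.Dict.getD, PySem.Dict.get?, List.find?, hb]

theorem flatten_aspec_fuel : ∀ (n : Nat) (l : List Char), l.length ≤ n →
    (aspec l).flatMap String.toList = (rspec l).flatMap hkTranslate := by
  intro n
  induction n with
  | zero =>
    intro l h
    have : l = [] := by cases l <;> simp_all
    subst this
    rw [aspec_nil, rspec_nil]
    rfl
  | succ n ih =>
    intro l h
    cases l with
    | nil => rw [aspec_nil, rspec_nil]; rfl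
    | cons c t =>
      by_cases hR : c = 'R'
      · subst hR
        by_cases hN : t.head? = some 'R'
        · obtain ⟨u, htu⟩ : ∃ u, t = 'R' :: u := by
            cases t with
            | nil => simp at hN
            | cons b u =>
              simp only [List.head?_cons, Option.some.injEq] at hN
              exact ⟨u, by rw [hN]⟩
          subst htu
          have hp : ['R','R'].isPrefixOf ('R' :: 'R' :: u) = true := by
            simp [List.isPrefixOf]
          rw [aspec_cons, rspec_cons, if_pos rfl, if_pos (by simp), if_pos hp]
          simp only [List.tail_cons, List.drop_succ_cons, List.drop_zero,
            List.flatMap_cons]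
          rw [ih u (by simp at h; omega)]
          have e1 : hkTranslate '.' = ['.'] := by decide
          have e2 : hkTranslate 'r' = ['r'] := by decide
          simp [e1, e2]
        · have hp : ['R','R'].isPrefixOf ('R' :: t) = false := by
            cases t with
            | nil => decide
            | cons b u =>
              have hb : b ≠ 'R' := by
                simp only [List.head?_cons, Option.some.injEq] at hN
                exact hN
              simp [List.isPrefixOf]
              exact fun hcc => hb hcc.symm
          rw [aspec_cons, rspec_cons, if_pos rfl, if_neg hN, if_neg (by simp [hp])]
          simp only [List.flatMap_cons]
          rw [ih t (by simp at h; omega)]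
          have e1 : hkTranslate 'R' = ['.', 'r'] := by decide
          simp [e1]
      · have hp : ['R','R'].isPrefixOf (c :: t) = false := by
          have hc : ('R' == c) = false := by
            simp only [beq_eq_false_iff_ne, ne_eq]
            exact fun hcc => hR hcc.symm
          simp [List.isPrefixOf, hc]
        by_cases hB : c = '|'
        · subst hB
          rw [aspec_cons, rspec_cons, if_neg hR, if_pos rfl, if_neg (by simp [hp])]
          simp only [List.flatMap_cons]
          rw [ih t (by simp at h; omega)]
          have e1 : hkTranslate '|' = ['.'] := by decide
          simp [e1]
        · rw [aspec_cons, rspec_cons, if_neg hR, if_neg hB, if_neg (by simp [hp])]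
          simp only [List.flatMap_cons]
          rw [ih t (by simp at h; omega)]
          have e1 : hkTranslate c = (hkReplacements.getD c (String.singleton c)).toList := by
            rw [hkTranslate, getD_mapping_of_ne c _ hB]
          simp [e1]

theorem join_nil_eq_flatten (parts : List (List Char)) :
    PySem.Chars.join [] parts = parts.flatten := by
  induction parts with
  | nil => rfl
  | cons a t ih =>
    cases t with
    | nil => simp [PySem.Chars.join, List.intercalate]
    | cons b u =>
      simp only [PySem.Chars.join, List.intercalate] at ih ⊢
      simp [List.intersperse] at ih ⊢
      exact ih

-- ===== VERDICT (by name: the statement is the Claim_ definition above) =====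
theorem hk_to_velthius_spec : Claim_equal_hk_to_velthius := by
  intro text _
  unfold Spec_hk_to_velthius hk_to_velthius hk_to_velthius_alt
  rw [hkLoop_eq text.toList text.toList.length 0 [] (by omega)]
  have hrep : (PySem.Str.replace text "RR" ".rr").toList
      = PySem.Chars.replace text.toList ['R','R'] ['.','r','r'] := by
    rw [PySem.Str.replace]
    simp [String.toList_ofList]
  rw [hrep, replace_eq]
  rw [PySem.Str.join]
  apply congrArg String.ofList
  rw [show ("".toList : List Char) = [] from rfl, join_nil_eq_flatten]
  simp only [List.nil_append, List.drop_zero]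
  rw [← List.flatMap_def]
  exact flatten_aspec_fuel text.toList.length text.toList le_rfl
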